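-- pv_equiv track=rewrite | github.com/celinehocquette/magicpopper | ilp-experiments/ilpexp/problem/list_constant/list.py | generate_constant_set
-- ===== SOURCE A (Python) =====
-- import itertools
--
-- MAGIC_VALUE = "c7"
--
-- def generate_constant_set(n_constants):
--
--     chr_set = [chr(i) for i in range(97, 123) if chr(i) != MAGIC_VALUE]
--
--     length = 1
--     constant_set = []
--     while n_constants > 0:
--         new_c = ["".join(x) for x in list(itertools.product(chr_set, repeat=length)) if
--                  "".join(x) not in ["magic_val", "nl", "and", "or","not","geq","head","tail","last","empty",
--                                     "pos","neg","my_length","fp","var","atom","call","halt"]]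
--         constant_set += new_c[:min(n_constants, len(new_c))]
--         n_constants -= len(new_c)
--         length += 1
--
--     return constant_set
-- ===== SOURCE B (Python) =====
-- # Unranking re-implementation: per length, count the valid words analytically and
-- # construct only the requested words directly from their rank (base-26 digits,
-- # rank shifted past the reserved words' ranks), instead of materializing and
-- # filtering the whole 26**L cartesian product.
--
-- _RESERVED = ["magic_val", "nl", "and", "or", "not", "geq", "head", "tail",
--              "last", "empty", "pos", "neg", "my_length", "fp", "var", "atom",
--              "call", "halt"]
--
-- def _word_index(w):
--     v = 0
--     for c in w:
--         v = v * 26 + (ord(c) - 97)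
--     return v
--
--
-- def _unrank(r, length, skips):
--     for s in skips:
--         if r >= s:
--             r += 1
--     chars = []
--     for _ in range(length):
--         chars.append(chr(97 + r % 26))
--         r //= 26
--     return "".join(reversed(chars))
--
--
-- def generate_constant_set(n_constants):
--     out = []
--     length = 1
--     remaining = n_constants
--     while remaining > 0:
--         skips = sorted(_word_index(w) for w in _RESERVED
--                        if len(w) == length and w.isalpha())
--         valid = 26 ** length - len(skips)
--         take = min(remaining, valid)
--         out.extend(_unrank(r, length, skips) for r in range(take))
--         remaining -= valid
--         length += 1
--     return out
-- ===== Notes on version B (the rewrite author's own statement) =====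
-- stated objective: alternative
-- what changed: Instead of materializing the whole itertools.product of the alphabet for every length reached and filtering out reserved words, B counts the valid words of each length analytically (alphabet size to the power of the length, minus the reserved words of that length) and constructs only the words it actually emits directly from their rank, by shifting the rank past the sorted reserved-word ranks and decoding it as base-26 letters.
import Mathlib
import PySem

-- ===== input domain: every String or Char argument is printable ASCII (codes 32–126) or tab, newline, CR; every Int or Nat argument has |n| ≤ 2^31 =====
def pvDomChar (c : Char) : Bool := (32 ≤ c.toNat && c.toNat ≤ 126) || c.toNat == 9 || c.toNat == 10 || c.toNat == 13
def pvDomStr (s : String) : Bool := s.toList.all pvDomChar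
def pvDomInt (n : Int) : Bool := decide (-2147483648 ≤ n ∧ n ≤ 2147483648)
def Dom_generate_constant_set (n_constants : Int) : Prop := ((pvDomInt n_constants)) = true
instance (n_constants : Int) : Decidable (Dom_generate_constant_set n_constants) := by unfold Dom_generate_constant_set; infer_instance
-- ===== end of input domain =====

set_option maxRecDepth 4000

-- B replaces "materialize the whole 26^length product and filter" by analytic per-length
-- valid counts plus direct base-26 unranking of only the requested words (alternative
-- algorithm; equivalence of the return values is proved below).

-- ===== PORT A =====

-- chr_set = [chr(i) for i in range(97, 123) if chr(i) != MAGIC_VALUE]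
def pvChrSet : List String :=
  ((PySem.List.pyRange 97 123 1).filter
      (fun i => String.ofList [Char.ofNat i.toNat] != "c7")).map
    (fun i => String.ofList [Char.ofNat i.toNat])

def pvReserved : List String :=
  ["magic_val", "nl", "and", "or", "not", "geq", "head", "tail", "last", "empty",
   "pos", "neg", "my_length", "fp", "var", "atom", "call", "halt"]

-- itertools.product(chr_set, repeat=length), in itertools' order (first component slowest)
def pvProduct : Nat → List (List String)
  | 0 => [[]]
  | L + 1 => pvChrSet.flatMap (fun c => (pvProduct L).map (fun x => c :: x))

-- new_c = ["".join(x) for x in list(itertools.product(chr_set, repeat=length)) if "".join(x) not in [...]]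
def pvNewC (L : Nat) : List String :=
  ((pvProduct L).filter (fun x => !(pvReserved.contains (PySem.Str.join "" x)))).map
    (fun x => PySem.Str.join "" x)

theorem join_level (cs : List Char) :
    PySem.Str.join "" (cs.map (fun c => String.ofList [c])) = String.ofList cs := by
  apply String.toList_inj.mp
  rw [PySem.Str.toList_join]
  simp only [List.map_map]
  have h : (String.toList ∘ fun c => String.ofList [c]) = fun c => [c] := by
    funext c; simp
  rw [h]
  simp [PySem.Chars.join_nil_singletons cs]

-- termination helper for the while loop: each level contributes at least one word ("a"*length)
theorem pvNewC_ne_nil (L : Nat) : pvNewC L ≠ [] := by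
  have hmem : List.replicate L "a" ∈ pvProduct L := by
    induction L with
    | zero => simp [pvProduct]
    | succ L ih =>
      rw [List.replicate_succ, pvProduct, List.mem_flatMap]
      exact ⟨"a", by decide, List.mem_map.mpr ⟨List.replicate L "a", ih, rfl⟩⟩
  have hjoin : PySem.Str.join "" (List.replicate L "a") = String.ofList (List.replicate L 'a') := by
    have h : List.replicate L "a" = (List.replicate L 'a').map (fun c => String.ofList [c]) := by
      simp [List.map_replicate]
    rw [h, join_level]
  have key : ∀ w : String, String.ofList (List.replicate L 'a') = w → (∃ c ∈ w.toList, c ≠ 'a') → False := by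
    rintro w h ⟨c, hc, hca⟩
    have h2 : List.replicate L 'a' = w.toList := by rw [← h]; simp
    exact hca ((List.eq_replicate_iff.mp h2.symm).2 c hc)
  have hnot : pvReserved.contains (String.ofList (List.replicate L 'a')) = false := by
    rw [List.contains_eq_mem, decide_eq_false_iff_not]
    intro hm
    simp only [pvReserved, List.mem_cons, List.not_mem_nil, or_false] at hm
    rcases hm with h|h|h|h|h|h|h|h|h|h|h|h|h|h|h|h|h|h <;> exact key _ h (by simp)
  apply List.ne_nil_of_mem (a := String.ofList (List.replicate L 'a'))
  unfold pvNewC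
  apply List.mem_map.mpr
  refine ⟨List.replicate L "a", List.mem_filter.mpr ⟨hmem, ?_⟩, hjoin⟩
  rw [hjoin, hnot]
  rfl

-- the while loop of A (state: n_constants, length, constant_set)
def pvLoopA (n : Int) (L : Nat) (acc : List String) : List String :=
  if _h : n > 0 then
    let newc := pvNewC L
    pvLoopA (n - newc.length) (L + 1)
      (acc ++ newc.take (min n (newc.length : Int)).toNat)
  else acc
termination_by n.toNat
decreasing_by
  have h1 : pvNewC L ≠ [] := pvNewC_ne_nil L
  have h2 : 1 ≤ (pvNewC L).length := List.length_pos_iff.mpr h1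
  omega

def generate_constant_set (n_constants : Int) : List String :=
  pvLoopA n_constants 1 []

-- ===== PORT B =====

-- _RESERVED (B's own copy, as in Source B)
def pvReservedB : List String :=
  ["magic_val", "nl", "and", "or", "not", "geq", "head", "tail", "last", "empty",
   "pos", "neg", "my_length", "fp", "var", "atom", "call", "halt"]

-- _word_index
def pvWordIndex (w : String) : Nat :=
  w.toList.foldl (fun v c => v * 26 + (c.toNat - 97)) 0

-- the chars list built inside _unrank (low digit first; the word is its reverse)
def pvUnrankChars : Nat → Nat → List Char
  | 0, _ => []
  | L + 1, r => Char.ofNat (97 + r % 26) :: pvUnrankChars L (r / 26)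

-- the skip loop of _unrank: for s in skips: if r >= s: r += 1
def pvAdj : List Nat → Nat → Nat
  | [], r => r
  | s :: t, r => pvAdj t (if r ≥ s then r + 1 else r)

-- _unrank(r, length, skips)
def pvUnrank (r : Nat) (L : Nat) (skips : List Nat) : String :=
  String.ofList (pvUnrankChars L (pvAdj skips r)).reverse

-- skips = sorted(_word_index(w) for w in _RESERVED if len(w) == length and w.isalpha())
def pvSkips (L : Nat) : List Nat :=
  PySem.List.sorted
    ((pvReservedB.filter
        (fun w => w.toList.length == L && PySem.Str.strIsalpha w)).map pvWordIndex)
    (fun x => x) false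

-- termination helper for B's while loop: valid = 26^L - len(skips) ≥ 1
theorem pvSkips_len_lt (L : Nat) : (pvSkips L).length < 26 ^ L := by
  by_cases h1 : L ≤ 1
  · interval_cases L <;> decide
  · have h2 : (pvSkips L).length ≤ 18 := by
      unfold pvSkips
      rw [PySem.List.length_sorted, List.length_map]
      exact le_trans (List.length_filter_le _ _) (by decide : pvReservedB.length ≤ 18)
    have h3 : (18 : Nat) < 26 ^ 2 := by norm_num
    have h4 : (26 : Nat) ^ 2 ≤ 26 ^ L := Nat.pow_le_pow_right (by norm_num) (by omega)
    omega

-- the while loop of B (state: remaining, length, out)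
def pvLoopB (rem : Int) (L : Nat) (acc : List String) : List String :=
  if _h : rem > 0 then
    let sk := pvSkips L
    let valid : Int := (26 : Int) ^ L - sk.length
    let take := min rem valid
    pvLoopB (rem - valid) (L + 1)
      (acc ++ (List.range take.toNat).map (fun r => pvUnrank r L sk))
  else acc
termination_by rem.toNat
decreasing_by
  have h2 : (pvSkips L).length < 26 ^ L := pvSkips_len_lt L
  have h3 : ((pvSkips L).length : Int) < (26 : Int) ^ L := by exact_mod_cast h2
  omega

def generate_constant_set_alt (n_constants : Int) : List String :=
  pvLoopB n_constants 1 []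

-- ===== PRECONDITION & SPEC =====
def Spec_generate_constant_set (n_constants : Int) (out : List String) : Prop := out = generate_constant_set_alt n_constants
instance (n_constants : Int) (out : List String) : Decidable (Spec_generate_constant_set n_constants out) := by unfold Spec_generate_constant_set; infer_instance

-- ===== CLAIM (what is proved, stated in full; the proofs are below) =====
def Claim_equal_generate_constant_set : Prop := ∀ (n_constants : Int), Dom_generate_constant_set n_constants → Spec_generate_constant_set n_constants (generate_constant_set n_constants)

-- ===== LEMMAS AND PROOFS =====

-- the word with rank r (no skips) at length L, big-endian
def pvW (L r : Nat) : List Char := (pvUnrankChars L r).reverse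

theorem pvW_succ (L r : Nat) :
    pvW (L + 1) r = pvW L (r / 26) ++ [Char.ofNat (97 + r % 26)] := by
  simp [pvW, pvUnrankChars]

theorem length_pvW (L r : Nat) : (pvW L r).length = L := by
  induction L generalizing r with
  | zero => rfl
  | succ L ih => simp [pvW_succ, ih]

theorem chars_pvW (L r : Nat) : ∀ c ∈ pvW L r, 97 ≤ c.toNat ∧ c.toNat ≤ 122 := by
  induction L generalizing r with
  | zero => simp [pvW, pvUnrankChars]
  | succ L ih =>
    intro c hc
    rw [pvW_succ] at hc
    rcases List.mem_append.mp hc with h | h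
    · exact ih _ _ h
    · simp only [List.mem_singleton] at h
      subst h
      have h26 : r % 26 < 26 := Nat.mod_lt _ (by norm_num)
      interval_cases h : r % 26 <;> simp_all

-- head form: the first character is the highest base-26 digit
theorem pvW_head (L q s : Nat) (hq : q < 26) (hs : s < 26 ^ L) :
    pvW (L + 1) (q * 26 ^ L + s) = Char.ofNat (97 + q) :: pvW L s := by
  induction L generalizing q s with
  | zero =>
    interval_cases s
    simp [pvW, pvUnrankChars, Nat.mod_eq_of_lt hq]
  | succ L ih =>
    have he : q * 26 ^ (L + 1) + s = 26 * (q * 26 ^ L) + s := by ring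
    have h1 : (q * 26 ^ (L + 1) + s) / 26 = q * 26 ^ L + s / 26 := by
      rw [he, Nat.mul_add_div (by norm_num)]
    have h2 : (q * 26 ^ (L + 1) + s) % 26 = s % 26 := by
      rw [he, Nat.mul_add_mod]
    rw [pvW_succ, h1, h2, ih q (s / 26) hq (by rw [pow_succ] at hs; omega), pvW_succ]
    simp

-- index is a left inverse of pvW
def pvIdx (cs : List Char) : Nat := cs.foldl (fun v c => v * 26 + (c.toNat - 97)) 0

theorem pvIdx_pvW (L r : Nat) (hr : r < 26 ^ L) : pvIdx (pvW L r) = r := by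
  induction L generalizing r with
  | zero => interval_cases r; rfl
  | succ L ih =>
    rw [pvW_succ]
    have h26 : r % 26 < 26 := Nat.mod_lt _ (by norm_num)
    have hv : (Char.ofNat (97 + r % 26)).toNat = 97 + r % 26 := by
      interval_cases h : r % 26 <;> simp_all
    have hfold : pvIdx (pvW L (r / 26) ++ [Char.ofNat (97 + r % 26)]) =
        pvIdx (pvW L (r / 26)) * 26 + ((Char.ofNat (97 + r % 26)).toNat - 97) := by
      simp [pvIdx, List.foldl_append]
    rw [hfold, hv, ih (r / 26) (by rw [pow_succ] at hr; omega)]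
    omega

theorem chrSet_eq :
    pvChrSet = (List.range 26).map (fun d => String.ofList [Char.ofNat (97 + d)]) := by
  decide

-- range (a*b) as a flatMap of blocks
theorem range_mul_flatMap (a b : Nat) :
    List.range (a * b) = (List.range a).flatMap (fun i => (List.range b).map (fun j => i * b + j)) := by
  induction a with
  | zero => simp
  | succ a ih =>
    rw [Nat.succ_mul, List.range_add, ih, List.range_succ]
    simp [List.flatMap_append]

-- the product level, joined, is the ranked enumeration
theorem pvProduct_eq (L : Nat) :
    pvProduct L = (List.range (26 ^ L)).map (fun r => (pvW L r).map (fun c => String.ofList [c])) := by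
  induction L with
  | zero => simp [pvProduct, pvW, pvUnrankChars]
  | succ L ih =>
    have hpow : (26 : Nat) ^ (L + 1) = 26 * 26 ^ L := by ring
    rw [pvProduct, chrSet_eq, ih, hpow, range_mul_flatMap, List.flatMap_map, List.map_flatMap]
    apply List.flatMap_congr
    intro d hd
    simp only [List.map_map]
    apply List.map_congr_left
    intro s hs
    simp only [Function.comp]
    rw [pvW_head L d s (List.mem_range.mp hd) (List.mem_range.mp hs)]
    simp


-- skips characterization
theorem pvSkips_eq (L : Nat) :
    pvSkips L = if L = 2 then [145, 349, 381]
      else if L = 3 then [341, 4176, 8898, 9171, 10522, 14213]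
      else if L = 4 then [13220, 35449, 123337, 125739, 193823, 334163]
      else if L = 5 then [2049474]
      else [] := by
  by_cases h6 : L ≤ 5
  · interval_cases L <;> decide
  · have hf : pvReservedB.filter (fun w => w.toList.length == L && PySem.Str.strIsalpha w) = [] := by
      rw [List.filter_eq_nil_iff]
      intro w hw
      fin_cases hw <;> simp_all <;> first | omega | (intro; decide)
    simp only [pvSkips, hf]
    rw [if_neg (by omega), if_neg (by omega), if_neg (by omega), if_neg (by omega)]
    decide

theorem word_case {L i : Nat} (hi : i < 26 ^ L) {w : String} (h : String.ofList (pvW L i) = w) :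
    pvW L i = w.toList ∧ L = w.toList.length ∧ i = pvIdx w.toList := by
  have h' : pvW L i = w.toList := by rw [← h]; simp
  refine ⟨h', ?_, ?_⟩
  · rw [← h']; exact (length_pvW L i).symm
  · rw [← h', pvIdx_pvW L i hi]

theorem mem_reserved_iff (L i : Nat) (hi : i < 26 ^ L) :
    pvReserved.contains (String.ofList (pvW L i)) = true ↔ i ∈ pvSkips L := by
  rw [List.contains_eq_mem, decide_eq_true_eq, pvSkips_eq]
  constructor
  · intro hm
    simp only [pvReserved, List.mem_cons, List.not_mem_nil, or_false] at hm
    rcases hm with h|h|h|h|h|h|h|h|h|h|h|h|h|h|h|h|h|h <;>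
      first
      | (obtain ⟨h', hL, hI⟩ := word_case hi h
         simp [pvIdx] at hL hI
         subst hL; subst hI; decide)
      | (exfalso
         obtain ⟨h', -, -⟩ := word_case hi h
         have hu : '_' ∈ pvW L i := by rw [h']; simp
         have h2 := chars_pvW L i '_' hu
         have h95 : ('_').toNat = 95 := by decide
         omega)
  · intro hm
    split_ifs at hm with h2 h3 h4 h5
    · subst h2; fin_cases hm <;> decide
    · subst h3; fin_cases hm <;> decide
    · subst h4; fin_cases hm <;> decide
    · subst h5; fin_cases hm; decide
    · simp at hm

theorem pvAdj_of_lt (sk : List Nat) (r : Nat) (h : ∀ s ∈ sk, r < s) : pvAdj sk r = r := by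
  induction sk with
  | nil => rfl
  | cons s t ih =>
    rw [pvAdj, if_neg (by have := h s (by simp); omega)]
    exact ih (fun u hu => h u (by simp [hu]))

-- generic: filtering skipped positions out of a shifted range = unranking via pvAdj
theorem filter_skips (sk : List Nat) (hsort : sk.Pairwise (· < ·)) :
    ∀ (c m : Nat), (∀ s ∈ sk, c ≤ s ∧ s < c + m) →
      ((List.range m).map (fun j => c + j)).filter (fun i => !(sk.contains i)) =
        (List.range (m - sk.length)).map (fun j => pvAdj sk (c + j)) := by
  induction sk with
  | nil =>
    intro c m _
    simp [pvAdj]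
  | cons s t ih =>
    intro c m hb
    obtain ⟨hcs, hsm⟩ := hb s (by simp)
    have hts : ∀ u ∈ t, s < u := (List.pairwise_cons.mp hsort).1
    have htb : ∀ u ∈ t, c ≤ u ∧ u < c + m := fun u hu => hb u (by simp [hu])
    have htp : t.Pairwise (· < ·) := (List.pairwise_cons.mp hsort).2
    set k := s - c with hk
    have hck : c + k = s := by omega
    have htlen : t.length ≤ m - k - 1 := by
      have hnd : t.Nodup := htp.imp Nat.ne_of_lt
      have hsub : t ⊆ List.range' (s + 1) (m - k - 1) := by
        intro u hu
        rw [List.mem_range'_1]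
        have h1 := hts u hu
        have h2 := htb u hu
        omega
      calc t.length = t.toFinset.card := (List.toFinset_card_of_nodup hnd).symm
        _ ≤ (List.range' (s + 1) (m - k - 1)).toFinset.card :=
            Finset.card_le_card (fun x hx => List.mem_toFinset.mpr (hsub (List.mem_toFinset.mp hx)))
        _ ≤ (List.range' (s + 1) (m - k - 1)).length := List.toFinset_card_le _
        _ = m - k - 1 := List.length_range'
    have hL1 : ((List.range m).map (fun j => c + j)).filter (fun i => !((s :: t).contains i))
        = (List.range k).map (fun j => c + j)
          ++ ((List.range (m - k - 1)).map (fun j => (s + 1) + j)).filter (fun i => !(t.contains i)) := by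
      conv_lhs => rw [show m = (k + 1) + (m - k - 1) by omega]
      rw [List.range_add, List.map_append, List.filter_append]
      congr 1
      · rw [List.range_succ, List.map_append, List.filter_append]
        have hb1 : ((List.range k).map (fun j => c + j)).filter (fun i => !((s :: t).contains i))
            = (List.range k).map (fun j => c + j) := by
          rw [List.filter_eq_self]
          intro x hx
          obtain ⟨j, hj, rfl⟩ := List.mem_map.mp hx
          have hjk : j < k := List.mem_range.mp hj
          have h1 : c + j ≠ s := by omega
          have h2 : (c + j) ∉ t := fun hmem => by have := hts _ hmem; omega
          simp [List.contains_eq_mem, h1, h2]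
        have hb2 : ([k].map (fun j => c + j)).filter (fun i => !((s :: t).contains i)) = [] := by
          simp [List.contains_eq_mem, hck]
        rw [hb1, hb2, List.append_nil]
      · rw [List.map_map]
        have he : ((fun j => c + j) ∘ (fun x => (k + 1) + x)) = fun j => (s + 1) + j := by
          funext j; simp only [Function.comp]; omega
        rw [he]
        apply List.filter_congr
        intro x hx
        obtain ⟨j, hj, rfl⟩ := List.mem_map.mp hx
        have h1 : (s + 1 + j) ≠ s := by omega
        simp [List.contains_eq_mem, h1]
    have hR : (List.range (m - (s :: t).length)).map (fun j => pvAdj (s :: t) (c + j))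
        = (List.range k).map (fun j => c + j)
          ++ (List.range (m - k - 1 - t.length)).map (fun j => pvAdj t (s + 1 + j)) := by
      have hm2 : m - (s :: t).length = k + (m - k - 1 - t.length) := by
        simp only [List.length_cons]; omega
      rw [hm2, List.range_add, List.map_append, List.map_map]
      congr 1
      · apply List.map_congr_left
        intro j hj
        have hjk : j < k := List.mem_range.mp hj
        rw [pvAdj, if_neg (by omega)]
        exact pvAdj_of_lt t (c + j) (fun u hu => by have := hts u hu; omega)
      · apply List.map_congr_left
        intro j hj
        simp only [Function.comp]
        rw [pvAdj, if_pos (by omega)]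
        congr 1
        omega
    rw [hL1, hR]
    congr 1
    rw [ih htp (s + 1) (m - k - 1) (fun u hu => by have := hts u hu; have := htb u hu; omega)]

-- the per-level identity: A's filtered level = B's unranked level
theorem newC_eq (L : Nat) :
    pvNewC L = (List.range (26 ^ L - (pvSkips L).length)).map (fun r => pvUnrank r L (pvSkips L)) := by
  have hsk_sorted : (pvSkips L).Pairwise (· < ·) := by
    rw [pvSkips_eq]; split_ifs <;> decide
  have hsk_lt : ∀ s ∈ pvSkips L, 0 ≤ s ∧ s < 0 + 26 ^ L := by
    rw [pvSkips_eq]; split_ifs with h1 h2 h3 h4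
    · subst h1; decide
    · subst h2; decide
    · subst h3; decide
    · subst h4; decide
    · intro s hs; simp at hs
  have hpred : ∀ i ∈ List.range (26 ^ L),
      ((fun x => !(pvReserved.contains (PySem.Str.join "" x))) ∘
        (fun r => (pvW L r).map (fun c => String.ofList [c]))) i
        = (fun i => !((pvSkips L).contains i)) i := by
    intro i hi
    simp only [Function.comp_apply]
    rw [join_level]
    have h1 := mem_reserved_iff L i (List.mem_range.mp hi)
    rw [List.contains_eq_mem, decide_eq_true_eq] at h1
    rw [List.contains_eq_mem, List.contains_eq_mem, decide_eq_decide.mpr h1]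
  have hfs := filter_skips (pvSkips L) hsk_sorted 0 (26 ^ L) hsk_lt
  simp only [zero_add, List.map_id_fun', id] at hfs
  unfold pvNewC
  rw [pvProduct_eq, List.filter_map, List.map_map, List.filter_congr hpred]
  rw [hfs, List.map_map]
  apply List.map_congr_left
  intro r _
  simp only [Function.comp_apply]
  rw [join_level]
  rfl

theorem loop_eq (n : Int) (L : Nat) (acc : List String) :
    pvLoopA n L acc = pvLoopB n L acc := by
  have main : ∀ N : Nat, ∀ n : Int, n.toNat ≤ N → ∀ L acc, pvLoopA n L acc = pvLoopB n L acc := by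
    intro N
    induction N with
    | zero =>
      intro n hn L acc
      have h0 : ¬ (n > 0) := by omega
      rw [pvLoopA, pvLoopB, dif_neg h0, dif_neg h0]
    | succ N ih =>
      intro n hn L acc
      by_cases h : n > 0
      · rw [pvLoopA, pvLoopB, dif_pos h, dif_pos h]
        have hltN : (pvSkips L).length < 26 ^ L := pvSkips_len_lt L
        have hlen : (pvNewC L).length = 26 ^ L - (pvSkips L).length := by
          rw [newC_eq, List.length_map, List.length_range]
        have hc2 : (((26 ^ L - (pvSkips L).length : Nat)) : Int)
            = (26 : Int) ^ L - ((pvSkips L).length : Int) := by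
          rw [Nat.cast_sub hltN.le]; push_cast; ring
        have hcast : ((pvNewC L).length : Int) = (26 : Int) ^ L - ((pvSkips L).length : Int) := by
          rw [hlen, hc2]
        have hchunk : (pvNewC L).take (min n ((26 : Int) ^ L - ((pvSkips L).length : Int))).toNat
            = (List.range (min n ((26 : Int) ^ L - ((pvSkips L).length : Int))).toNat).map
                (fun r => pvUnrank r L (pvSkips L)) := by
          rw [← hc2, newC_eq, ← List.map_take, List.take_range]
          exact congrArg (fun k => List.map (fun r => pvUnrank r L (pvSkips L)) (List.range k)) (by omega)
        simp only [hcast, hchunk]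
        exact ih (n - ((26 : Int) ^ L - ((pvSkips L).length : Int))) (by
          have h1 : (1 : Int) ≤ (26 : Int) ^ L - ((pvSkips L).length : Int) := by
            have := hcast
            have h2 : 1 ≤ (pvNewC L).length := List.length_pos_iff.mpr (pvNewC_ne_nil L)
            omega
          omega) _ _
      · rw [pvLoopA, pvLoopB, dif_neg h, dif_neg h]
  exact main n.toNat n le_rfl L acc

-- ===== VERDICT (by name: the statement is the Claim_ definition above) =====
theorem generate_constant_set_spec : Claim_equal_generate_constant_set := by
  intro n _
  unfold Spec_generate_constant_set generate_constant_set generate_constant_set_alt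
  exact loop_eq n 1 []
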